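-- pv_equiv track=rewrite | github.com/Marcel-Velez/playability-billboard | utils/custom_data_functions.py | extract_lab_seq
-- ===== SOURCE A (Python) =====
-- letter2num = {
--     'C': 0,
--     'C#': 1,
--     'Db': 1,
--     'D': 2,
--     'D#': 3,
--     'Eb': 3,
--     'E': 4,
--     'E#': 5,
--     'Fb': 4,
--     'F': 5,
--     'F#': 6,
--     'Gb': 6,
--     'G': 7,
--     'G#': 8,
--     'Ab': 8,
--     'A': 9,
--     'A#': 10,
--     'Bb': 10,
--     'B': 11,
--     'Cb': 11,
-- }
--
-- num2letter = {
--     0: 'C',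
--     1: 'C#',
--     2: 'D',
--     3: 'Eb',
--     4: 'E',
--     5: 'F',
--     6: 'F#',
--     7: 'G',
--     8: 'Ab',
--     9: 'A',
--     10: 'Bb',
--     11: 'B',
-- }
--
-- def transpose(chord, transposition):
--     if transposition == 0:
--         return chord
--     if chord == 'N':
--         return chord
--     root, rest = chord.split(':')
--     root_number = letter2num[root]
--     root_transposed = (root_number + transposition) % 12
--     root_transposed = num2letter[root_transposed]
--     return root_transposed + ':' + rest
--
-- def extract_lab_seq(chordify_data, transposition):
--     start = True
--     phrase_counter = 0
--     cleaned_sequence = ''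
--     lab_sequence = ''
--     prev = 0
--     cur = 0
--     for chord in chordify_data:
--         chord_info = chord.split(';')
--         prev = cur
--         cur = int(chord_info[0])
--         if start:
--             start = False
--             cleaned_sequence += f'{chord_info[2]}\t| '
--         if cur < prev:
--             if phrase_counter >= 4:
--                 cleaned_sequence += f'|\nPHRASE{chord_info[2]}\t'
--                 phrase_counter = 0
--             cleaned_sequence += '| '
--             phrase_counter += 1
--
--         cleaned_sequence += transpose(chord_info[1], transposition) + ' '
--
--         lab_sequence += chord_info[2] + '\t' + chord_info[3] + '\t' + chord_info[1] + '\n'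
--     cleaned_sequence += '|'
--     return cleaned_sequence, lab_sequence
-- ===== SOURCE B (Python) =====
-- # Two-pass re-implementation: parse records, partition into measures, then render;
-- # root transposition via letter+accidental arithmetic instead of the dict.
--
-- def _root_num(root):
--     base = {'C': 0, 'D': 2, 'E': 4, 'F': 5, 'G': 7, 'A': 9, 'B': 11}[root[0]]
--     if len(root) > 1:
--         base = base + 1 if root[1] == '#' else base - 1
--     return base
--
--
-- def _transpose_b(chord, transposition):
--     if transposition == 0 or chord == 'N':
--         return chord
--     root, rest = chord.split(':')
--     names = ['C', 'C#', 'D', 'Eb', 'E', 'F', 'F#', 'G', 'Ab', 'A', 'Bb', 'B']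
--     return names[(_root_num(root) + transposition) % 12] + ':' + rest
--
--
-- def extract_lab_seq(chordify_data, transposition):
--     recs = []
--     for chord in chordify_data:
--         f = chord.split(';')
--         recs.append((int(f[0]), f[1], f[2], f[3]))
--     lab_sequence = ''.join(f2 + '\t' + f3 + '\t' + f1 + '\n' for _, f1, f2, f3 in recs)
--     if not recs:
--         return '|', lab_sequence
--     # partition into measures: a new measure starts when the index drops
--     groups = []
--     cur = []
--     prev = 0
--     for r in recs:
--         if r[0] < prev:
--             groups.append(cur)
--             cur = [r]
--         else:
--             cur.append(r)
--         prev = r[0]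
--     groups.append(cur)
--     # render
--     out = recs[0][2] + '\t| '
--     pc = 0
--     first = True
--     for g in groups:
--         if not first:
--             if pc >= 4:
--                 out += '|\nPHRASE' + g[0][2] + '\t'
--                 pc = 0
--             out += '| '
--             pc += 1
--         first = False
--         for r in g:
--             out += _transpose_b(r[1], transposition) + ' '
--     out += '|'
--     return out, lab_sequence
-- ===== Notes on version B (the rewrite author's own statement) =====
-- stated objective: alternative
-- what changed: B replaces A's single stateful render loop by a two-pass pipeline: parse every chord into a record, partition the records into measures where the bar index drops, build the lab sequence as one join, and render the cleaned sequence by walking the measure list; root transposition uses letter+accidental arithmetic and a name table instead of the two dicts.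
import Mathlib
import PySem

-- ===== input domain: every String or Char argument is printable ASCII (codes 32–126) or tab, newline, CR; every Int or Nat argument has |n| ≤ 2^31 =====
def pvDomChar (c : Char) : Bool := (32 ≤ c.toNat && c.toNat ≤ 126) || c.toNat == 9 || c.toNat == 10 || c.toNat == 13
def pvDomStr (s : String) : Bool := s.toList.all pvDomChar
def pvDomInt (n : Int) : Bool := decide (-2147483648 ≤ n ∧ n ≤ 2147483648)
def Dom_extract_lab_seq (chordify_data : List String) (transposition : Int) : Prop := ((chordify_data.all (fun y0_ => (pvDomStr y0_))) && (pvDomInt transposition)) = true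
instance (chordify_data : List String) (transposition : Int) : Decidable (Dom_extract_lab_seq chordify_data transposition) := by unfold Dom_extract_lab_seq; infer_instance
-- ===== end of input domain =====

-- B rebuilds the output in two passes (parse records, partition into measures, render), instead of A's single stateful loop; same values, same cost.


-- ===== PORT A =====
def letter2numD : PySem.Dict String Int :=
  PySem.Dict.ofList [("C", 0), ("C#", 1), ("Db", 1), ("D", 2), ("D#", 3), ("Eb", 3), ("E", 4),
    ("E#", 5), ("Fb", 4), ("F", 5), ("F#", 6), ("Gb", 6), ("G", 7), ("G#", 8), ("Ab", 8),
    ("A", 9), ("A#", 10), ("Bb", 10), ("B", 11), ("Cb", 11)]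

def num2letterD : PySem.Dict Int String :=
  PySem.Dict.ofList [(0, "C"), (1, "C#"), (2, "D"), (3, "Eb"), (4, "E"), (5, "F"), (6, "F#"),
    (7, "G"), (8, "Ab"), (9, "A"), (10, "Bb"), (11, "B")]

def transposeA (chord : String) (transposition : Int) : String :=
  if transposition = 0 then chord
  else if chord = "N" then chord
  else
    match (PySem.Str.split? chord ":").getD [] with
    | [root, rest] =>
        num2letterD.getD (PySem.Int.mod (letter2numD.getD root 0 + transposition) 12) "" ++ ":" ++ rest
    | _ => chord  -- Python raises ValueError on the 2-unpacking here; excluded by Pre_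

structure StA where
  start : Bool
  pc : Int
  cleaned : String
  lab : String
  prev : Int
  cur : Int
deriving Repr, DecidableEq

def stepA (t : Int) (st : StA) (chord : String) : StA :=
  let f := (PySem.Str.split? chord ";").getD []   -- split(';') never raises
  let prev := st.cur
  let cur := (PySem.Int.ofStr? (f.getD 0 "")).getD 0   -- int(...) raising excluded by Pre_
  let start := if st.start then false else st.start
  let c1 := if st.start then st.cleaned ++ f.getD 2 "" ++ "\t| " else st.cleaned
  let c2 := if cur < prev then (if st.pc ≥ 4 then c1 ++ "|\nPHRASE" ++ f.getD 2 "" ++ "\t" else c1) ++ "| " else c1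
  let pc2 := if cur < prev then (if st.pc ≥ 4 then (0 : Int) else st.pc) + 1 else st.pc
  let c3 := c2 ++ transposeA (f.getD 1 "") t ++ " "
  let lab2 := st.lab ++ f.getD 2 "" ++ "\t" ++ f.getD 3 "" ++ "\t" ++ f.getD 1 "" ++ "\n"
  ⟨start, pc2, c3, lab2, prev, cur⟩

def extract_lab_seq (chordify_data : List String) (transposition : Int) : String × String :=
  let st := chordify_data.foldl (stepA transposition) ⟨true, 0, "", "", 0, 0⟩
  (st.cleaned ++ "|", st.lab)

-- ===== PORT B =====
def baseD : PySem.Dict Char Int :=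
  PySem.Dict.ofList [('C', 0), ('D', 2), ('E', 4), ('F', 5), ('G', 7), ('A', 9), ('B', 11)]

def namesL : List String := ["C", "C#", "D", "Eb", "E", "F", "F#", "G", "Ab", "A", "Bb", "B"]

def rootNum (root : String) : Int :=
  let base := baseD.getD ((PySem.Str.pyGet? root 0).getD ' ') 0
  if 1 < PySem.Str.len root then
    (if (PySem.Str.pyGet? root 1).getD ' ' = '#' then base + 1 else base - 1)
  else base

def transposeB (chord : String) (transposition : Int) : String :=
  if transposition = 0 ∨ chord = "N" then chord
  else
    match (PySem.Str.split? chord ":").getD [] with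
    | [root, rest] =>
        (PySem.List.pyGet? namesL (PySem.Int.mod (rootNum root + transposition) 12)).getD "" ++ ":" ++ rest
    | _ => chord  -- excluded by Pre_

abbrev Rec := Int × String × String × String

def parseRec (s : String) : Rec :=
  let f := (PySem.Str.split? s ";").getD []
  ((PySem.Int.ofStr? (f.getD 0 "")).getD 0, f.getD 1 "", f.getD 2 "", f.getD 3 "")

def lineB (r : Rec) : String := r.2.2.1 ++ "\t" ++ r.2.2.2 ++ "\t" ++ r.2.1 ++ "\n"

-- partition into measures: a new measure starts when the bar index drops
def stepG (acc : List (List Rec) × List Rec × Int) (r : Rec) : List (List Rec) × List Rec × Int :=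
  if r.1 < acc.2.2 then (acc.1 ++ [acc.2.1], [r], r.1) else (acc.1, acc.2.1 ++ [r], r.1)

-- render one measure
def stepR (t : Int) (acc : String × Int × Bool) (g : List Rec) : String × Int × Bool :=
  let out1 := if acc.2.2 then acc.1
    else (if acc.2.1 ≥ 4 then acc.1 ++ "|\nPHRASE" ++ (g.headD (0, "", "", "")).2.2.1 ++ "\t" else acc.1) ++ "| "
  let pc1 := if acc.2.2 then acc.2.1 else (if acc.2.1 ≥ 4 then (0 : Int) else acc.2.1) + 1
  (g.foldl (fun o r => o ++ transposeB r.2.1 t ++ " ") out1, pc1, false)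

def extract_lab_seq_alt (chordify_data : List String) (transposition : Int) : String × String :=
  let recs := chordify_data.map parseRec
  let lab := PySem.Str.join "" (recs.map lineB)
  match recs with
  | [] => ("|", lab)
  | r0 :: _ =>
    let g := recs.foldl stepG (([] : List (List Rec)), ([] : List Rec), (0 : Int))
    let rend := (g.1 ++ [g.2.1]).foldl (stepR transposition) (r0.2.2.1 ++ "\t| ", (0 : Int), true)
    (rend.1 ++ "|", lab)

-- ===== PRECONDITION & SPEC =====
def rootsL : List String :=
  ["C", "C#", "Db", "D", "D#", "Eb", "E", "E#", "Fb", "F", "F#", "Gb", "G", "G#", "Ab",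
   "A", "A#", "Bb", "B", "Cb"]

-- exactly where Python A returns: every chord has ≥ 4 ';'-fields, an int-parsable index field,
-- and (when actually transposed) a chord of the form root:rest with a known root
abbrev chordOK (t : Int) (s : String) : Prop :=
  let f := (PySem.Str.split? s ";").getD []
  4 ≤ f.length ∧ (PySem.Int.ofStr? (f.getD 0 "")).isSome = true ∧
    (t ≠ 0 → f.getD 1 "" ≠ "N" →
      ((PySem.Str.split? (f.getD 1 "") ":").getD []).length = 2 ∧
      ((PySem.Str.split? (f.getD 1 "") ":").getD []).getD 0 "" ∈ rootsL)

def Pre_extract_lab_seq (chordify_data : List String) (transposition : Int) : Prop :=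
  ∀ s ∈ chordify_data, chordOK transposition s

instance (chordify_data : List String) (transposition : Int) : Decidable (Pre_extract_lab_seq chordify_data transposition) := by
  unfold Pre_extract_lab_seq; infer_instance

def pvWitness_extract_lab_seq : List String × Int := (["0;C:maj;A;1", "-1;N;B;2"], 1)

def Spec_extract_lab_seq (chordify_data : List String) (transposition : Int) (out : String × String) : Prop := out = extract_lab_seq_alt chordify_data transposition
instance (chordify_data : List String) (transposition : Int) (out : String × String) : Decidable (Spec_extract_lab_seq chordify_data transposition out) := by unfold Spec_extract_lab_seq; infer_instance

-- ===== CLAIM (what is proved, stated in full; the proofs are below) =====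
def Claim_equal_extract_lab_seq : Prop := ∀ (chordify_data : List String) (transposition : Int), Dom_extract_lab_seq chordify_data transposition → Pre_extract_lab_seq chordify_data transposition → Spec_extract_lab_seq chordify_data transposition (extract_lab_seq chordify_data transposition)

-- ===== LEMMAS AND PROOFS =====

-- A's loop body, re-expressed on the parsed record (definitionally equal to stepA)
def stepA' (t : Int) (st : StA) (r : Rec) : StA :=
  let prev := st.cur
  let cur := r.1
  let start := if st.start then false else st.start
  let c1 := if st.start then st.cleaned ++ r.2.2.1 ++ "\t| " else st.cleaned
  let c2 := if cur < prev then (if st.pc ≥ 4 then c1 ++ "|\nPHRASE" ++ r.2.2.1 ++ "\t" else c1) ++ "| " else c1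
  let pc2 := if cur < prev then (if st.pc ≥ 4 then (0 : Int) else st.pc) + 1 else st.pc
  let c3 := c2 ++ transposeA r.2.1 t ++ " "
  let lab2 := st.lab ++ r.2.2.1 ++ "\t" ++ r.2.2.2 ++ "\t" ++ r.2.1 ++ "\n"
  ⟨start, pc2, c3, lab2, prev, cur⟩

def rendOut (t : Int) (h : String) (gs : List (List Rec)) : String × Int × Bool :=
  gs.foldl (stepR t) (h, 0, true)

lemma join_empty_cons (x : String) (xs : List String) :
    PySem.Str.join "" (x :: xs) = x ++ PySem.Str.join "" xs := by
  cases xs with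
  | nil =>
      simp [PySem.Str.join, PySem.Chars.join_singleton, PySem.Chars.join_nil,
        String.ofList_toList, show ("" : String).toList = [] from by decide]
  | cons y ys =>
      simp [PySem.Str.join, PySem.Chars.join_cons_cons, String.ofList_append,
        String.ofList_toList, show ("" : String).toList = [] from by decide]

lemma join_empty_nil : PySem.Str.join "" ([] : List String) = "" := by decide

lemma rendOut_append_one (t : Int) (h : String) (gs : List (List Rec)) (g : List Rec) :
    rendOut t h (gs ++ [g]) = stepR t (rendOut t h gs) g := by
  rw [rendOut, rendOut, List.foldl_append]; rfl

lemma rend_last_bool (t : Int) (h : String) (gs : List (List Rec)) (g : List Rec) :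
    (rendOut t h (gs ++ [g])).2.2 = false := by
  rw [rendOut_append_one]; rfl

lemma stepR_singleton (t : Int) (a : String × Int × Bool) (hb : a.2.2 = false) (r : Rec) :
    stepR t a [r] = ((if a.2.1 ≥ 4 then a.1 ++ "|\nPHRASE" ++ r.2.2.1 ++ "\t" else a.1) ++ "| " ++ transposeB r.2.1 t ++ " ",
      (if a.2.1 ≥ 4 then (0 : Int) else a.2.1) + 1, false) := by
  simp [stepR, hb]

lemma stepR_snoc (t : Int) (a : String × Int × Bool) (g : List Rec) (hg : g ≠ []) (r : Rec) :
    stepR t a (g ++ [r]) = ((stepR t a g).1 ++ transposeB r.2.1 t ++ " ", (stepR t a g).2.1, false) := by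
  obtain ⟨x, g', rfl⟩ : ∃ x g', g = x :: g' := by
    cases g with
    | nil => exact absurd rfl hg
    | cons x g' => exact ⟨x, g', rfl⟩
  simp [stepR, List.foldl_append]

lemma rend_boundary (t : Int) (h : String) (gs : List (List Rec)) (cur : List Rec) (r : Rec) :
    rendOut t h ((gs ++ [cur]) ++ [[r]]) =
      ((if (rendOut t h (gs ++ [cur])).2.1 ≥ 4 then
          (rendOut t h (gs ++ [cur])).1 ++ "|\nPHRASE" ++ r.2.2.1 ++ "\t"
        else (rendOut t h (gs ++ [cur])).1) ++ "| " ++ transposeB r.2.1 t ++ " ",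
       (if (rendOut t h (gs ++ [cur])).2.1 ≥ 4 then (0 : Int) else (rendOut t h (gs ++ [cur])).2.1) + 1, false) := by
  rw [rendOut_append_one, stepR_singleton t _ (rend_last_bool t h gs cur) r]

lemma rend_snoc (t : Int) (h : String) (gs : List (List Rec)) (cur : List Rec) (hcur : cur ≠ []) (r : Rec) :
    rendOut t h (gs ++ [cur ++ [r]]) =
      ((rendOut t h (gs ++ [cur])).1 ++ transposeB r.2.1 t ++ " ", (rendOut t h (gs ++ [cur])).2.1, false) := by
  rw [rendOut_append_one, stepR_snoc t _ cur hcur r, ← rendOut_append_one]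

lemma lookup12 (m : Int) (h0 : 0 ≤ m) (h1 : m < 12) :
    num2letterD.getD m "" = (PySem.List.pyGet? namesL m).getD "" := by
  interval_cases m <;> rfl

lemma rootnum_eq : ∀ root ∈ rootsL, letter2numD.getD root 0 % 12 = rootNum root % 12 := by decide

lemma transpose_eq (c : String) (t : Int)
    (hc : t ≠ 0 → c ≠ "N" →
      ((PySem.Str.split? c ":").getD []).length = 2 ∧
      ((PySem.Str.split? c ":").getD []).getD 0 "" ∈ rootsL) :
    transposeA c t = transposeB c t := by
  by_cases ht : t = 0
  · simp [transposeA, transposeB, ht]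
  by_cases hN : c = "N"
  · simp [transposeA, transposeB, hN]
  obtain ⟨hlen, hmem⟩ := hc ht hN
  obtain ⟨root, rest, hsr⟩ := List.length_eq_two.mp hlen
  rw [hsr] at hmem
  simp only [List.getD_cons_zero] at hmem
  simp only [transposeA, transposeB, if_neg ht, if_neg hN,
    if_neg (not_or.mpr ⟨ht, hN⟩), hsr]
  show num2letterD.getD (PySem.Int.mod (letter2numD.getD root 0 + t) 12) "" ++ ":" ++ rest
     = (PySem.List.pyGet? namesL (PySem.Int.mod (rootNum root + t) 12)).getD "" ++ ":" ++ rest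
  have hm : PySem.Int.mod (letter2numD.getD root 0 + t) 12 = PySem.Int.mod (rootNum root + t) 12 := by
    rw [PySem.Int.mod_eq_emod_of_pos (by norm_num), PySem.Int.mod_eq_emod_of_pos (by norm_num)]
    have := rootnum_eq root hmem
    omega
  rw [hm, lookup12 _ (PySem.Int.mod_nonneg _ (by norm_num)) (PySem.Int.mod_lt _ (by norm_num))]

lemma loop_inv (t : Int) (h : String) :
    ∀ (rs : List Rec), (∀ r ∈ rs, transposeA r.2.1 t = transposeB r.2.1 t) →
    ∀ (gs : List (List Rec)) (cur : List Rec) (prev p0 : Int) (L : String), cur ≠ [] →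
      (rs.foldl (stepA' t) ⟨false, (rendOut t h (gs ++ [cur])).2.1, (rendOut t h (gs ++ [cur])).1, L, p0, prev⟩).start = false ∧
      (rs.foldl (stepA' t) ⟨false, (rendOut t h (gs ++ [cur])).2.1, (rendOut t h (gs ++ [cur])).1, L, p0, prev⟩).pc
        = (rendOut t h ((rs.foldl stepG (gs, cur, prev)).1 ++ [(rs.foldl stepG (gs, cur, prev)).2.1])).2.1 ∧
      (rs.foldl (stepA' t) ⟨false, (rendOut t h (gs ++ [cur])).2.1, (rendOut t h (gs ++ [cur])).1, L, p0, prev⟩).cleaned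
        = (rendOut t h ((rs.foldl stepG (gs, cur, prev)).1 ++ [(rs.foldl stepG (gs, cur, prev)).2.1])).1 ∧
      (rs.foldl (stepA' t) ⟨false, (rendOut t h (gs ++ [cur])).2.1, (rendOut t h (gs ++ [cur])).1, L, p0, prev⟩).lab
        = L ++ PySem.Str.join "" (rs.map lineB) ∧
      (rs.foldl (stepA' t) ⟨false, (rendOut t h (gs ++ [cur])).2.1, (rendOut t h (gs ++ [cur])).1, L, p0, prev⟩).cur
        = (rs.foldl stepG (gs, cur, prev)).2.2 ∧
      (rs.foldl stepG (gs, cur, prev)).2.1 ≠ [] := by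
  intro rs
  induction rs with
  | nil =>
      intro _ gs cur prev p0 L hcur
      refine ⟨rfl, rfl, rfl, ?_, rfl, hcur⟩
      show L = L ++ PySem.Str.join "" (List.map lineB [])
      rw [List.map_nil, join_empty_nil, String.append_empty]
  | cons r rs ih =>
      intro hok gs cur prev p0 L hcur
      have hokr : transposeA r.2.1 t = transposeB r.2.1 t := hok r (List.mem_cons_self ..)
      have hokrs : ∀ x ∈ rs, transposeA x.2.1 t = transposeB x.2.1 t :=
        fun x hx => hok x (List.mem_cons_of_mem _ hx)
      simp only [List.foldl_cons]
      by_cases hlt : r.1 < prev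
      · have hg : stepG (gs, cur, prev) r = (gs ++ [cur], [r], r.1) := by simp [stepG, hlt]
        have hA : stepA' t ⟨false, (rendOut t h (gs ++ [cur])).2.1, (rendOut t h (gs ++ [cur])).1, L, p0, prev⟩ r
            = ⟨false, (rendOut t h ((gs ++ [cur]) ++ [[r]])).2.1, (rendOut t h ((gs ++ [cur]) ++ [[r]])).1, L ++ lineB r, prev, r.1⟩ := by
          rw [rend_boundary t h gs cur r]
          simp [stepA', hlt, hokr, lineB, String.append_assoc]
        rw [hA, hg]
        obtain ⟨h1, h2, h3, h4, h5, h6⟩ := ih hokrs (gs ++ [cur]) [r] r.1 prev (L ++ lineB r) (by simp)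
        refine ⟨h1, h2, h3, ?_, h5, h6⟩
        rw [h4, List.map_cons, join_empty_cons, ← String.append_assoc]
      · have hg : stepG (gs, cur, prev) r = (gs, cur ++ [r], r.1) := by simp [stepG, hlt]
        have hA : stepA' t ⟨false, (rendOut t h (gs ++ [cur])).2.1, (rendOut t h (gs ++ [cur])).1, L, p0, prev⟩ r
            = ⟨false, (rendOut t h (gs ++ [cur ++ [r]])).2.1, (rendOut t h (gs ++ [cur ++ [r]])).1, L ++ lineB r, prev, r.1⟩ := by
          rw [rend_snoc t h gs cur hcur r]
          simp [stepA', hlt, hokr, lineB, String.append_assoc]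
        rw [hA, hg]
        obtain ⟨h1, h2, h3, h4, h5, h6⟩ := ih hokrs gs (cur ++ [r]) r.1 prev (L ++ lineB r) (by simp)
        refine ⟨h1, h2, h3, ?_, h5, h6⟩
        rw [h4, List.map_cons, join_empty_cons, ← String.append_assoc]

-- ===== VERDICT (by name: the statement is the Claim_ definition above) =====
theorem extract_lab_seq_spec : Claim_equal_extract_lab_seq := by
  intro cd t _hdom hpre
  show extract_lab_seq cd t = extract_lab_seq_alt cd t
  have hok : ∀ r ∈ cd.map parseRec, transposeA r.2.1 t = transposeB r.2.1 t := by
    intro r hr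
    obtain ⟨s, hs, rfl⟩ := List.mem_map.mp hr
    exact transpose_eq _ t (fun h1 h2 => ((hpre s hs).2.2) h1 h2)
  cases cd with
  | nil =>
      simp [extract_lab_seq, extract_lab_seq_alt, String.empty_append, join_empty_nil]
  | cons c0 cs =>
      have hfold : ∀ (init : StA), (c0 :: cs).foldl (stepA t) init = ((c0 :: cs).map parseRec).foldl (stepA' t) init := by
        intro init; rw [List.foldl_map]; rfl
      set r0 := parseRec c0 with hr0
      have hokr0 : transposeA r0.2.1 t = transposeB r0.2.1 t :=
        hok r0 (by simp [hr0])
      have hokrs : ∀ x ∈ cs.map parseRec, transposeA x.2.1 t = transposeB x.2.1 t := by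
        intro x hx; exact hok x (by simp [List.map_cons]; right; simpa using hx)
      set hd := r0.2.2.1 ++ "\t| " with hhd
      by_cases h0 : r0.1 < 0
      · have hA0 : stepA' t ⟨true, 0, "", "", 0, 0⟩ r0
            = ⟨false, (rendOut t hd ([[]] ++ [[r0]])).2.1, (rendOut t hd ([[]] ++ [[r0]])).1, lineB r0, 0, r0.1⟩ := by
          simp [stepA', rendOut, stepR, h0, hokr0, lineB, hhd, String.append_assoc, String.empty_append]
        have hg0 : stepG ([], [], 0) r0 = ([[]], [r0], r0.1) := by simp [stepG, h0]
        obtain ⟨h1, h2, h3, h4, h5, h6⟩ :=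
          loop_inv t hd (cs.map parseRec) hokrs [[]] [r0] r0.1 0 (lineB r0) (by simp)
        simp only [extract_lab_seq, extract_lab_seq_alt, List.map_cons, List.foldl_cons, hfold,
          hA0, hg0, ← hr0, ← hhd]
        rw [h3, h4, join_empty_cons]
        rfl
      · have hA0 : stepA' t ⟨true, 0, "", "", 0, 0⟩ r0
            = ⟨false, (rendOut t hd ([] ++ [[r0]])).2.1, (rendOut t hd ([] ++ [[r0]])).1, lineB r0, 0, r0.1⟩ := by
          simp [stepA', rendOut, stepR, h0, hokr0, lineB, hhd, String.append_assoc, String.empty_append]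
        have hg0 : stepG ([], [], 0) r0 = ([], [r0], r0.1) := by simp [stepG, h0]
        obtain ⟨h1, h2, h3, h4, h5, h6⟩ :=
          loop_inv t hd (cs.map parseRec) hokrs [] [r0] r0.1 0 (lineB r0) (by simp)
        simp only [extract_lab_seq, extract_lab_seq_alt, List.map_cons, List.foldl_cons, hfold,
          hA0, hg0, ← hr0, ← hhd]
        rw [h3, h4, join_empty_cons]
        rfl
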